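-- pv_equiv track=rewrite | github.com/budidino/AoC-python | 2015-d11.py | hasTwoPairs
-- ===== SOURCE A (Python) =====
-- def hasTwoPairs(string):
--   pairIndex = []
--   index = 0
--   for char1, char2 in zip(string, string[1:]):
--     index += 1
--     if char1 == char2:
--       pairIndex.append(index)
--       if len(pairIndex) > 1:
--         if max(pairIndex) - min(pairIndex) >= 2:
--           return True
--   return False
-- ===== SOURCE B (Python) =====
-- def hasTwoPairs(string):
--     n = len(string)
--     first = None
--     for i in range(n - 1):
--         if string[i] == string[i + 1]:
--             first = i
--             break
--     if first is None:
--         return False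
--     s = string[first + 2:]
--     return any(a == b for a, b in zip(s, s[1:]))
-- ===== Notes on version B (the rewrite author's own statement) =====
-- stated objective: simpler
-- what changed: B finds the first adjacent pair's index, then merely checks whether any adjacent pair exists in the substring starting two positions later, instead of maintaining a growing list of pair indices with max/min recomputed on every append.
import Mathlib
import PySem

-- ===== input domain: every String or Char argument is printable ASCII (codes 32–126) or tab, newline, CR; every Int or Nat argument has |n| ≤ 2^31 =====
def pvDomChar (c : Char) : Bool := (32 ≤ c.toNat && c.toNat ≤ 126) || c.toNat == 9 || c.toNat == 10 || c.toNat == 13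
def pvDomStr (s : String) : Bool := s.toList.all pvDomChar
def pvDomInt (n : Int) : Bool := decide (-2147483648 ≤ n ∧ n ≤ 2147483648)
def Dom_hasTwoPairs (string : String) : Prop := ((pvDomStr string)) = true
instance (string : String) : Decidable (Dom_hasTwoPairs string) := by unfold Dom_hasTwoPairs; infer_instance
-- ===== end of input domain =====

-- B replaces A's growing pair-index list with max/min recomputed on every append by
-- "find the first adjacent pair, then look for any adjacent pair two positions later" (objective: simpler).

-- ===== PORT A =====
-- the for-loop over zip(string, string[1:]) with state (index, pairIndex) and early return
def hasTwoPairsLoop (l1 l2 : List Char) (index : Int) (pairIndex : List Int) : Bool :=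
  match l1, l2 with
  | c1 :: t1, c2 :: t2 =>
    let index := index + 1
    if c1 == c2 then
      let pairIndex := pairIndex ++ [index]
      if pairIndex.length > 1 then
        if (PySem.List.max? pairIndex (fun x => x)).getD 0
             - (PySem.List.min? pairIndex (fun x => x)).getD 0 ≥ 2 then
          true
        else hasTwoPairsLoop t1 t2 index pairIndex
      else hasTwoPairsLoop t1 t2 index pairIndex
    else hasTwoPairsLoop t1 t2 index pairIndex
  | _, _ => false

def hasTwoPairs (string : String) : Bool :=
  hasTwoPairsLoop string.toList string.toList.tail 0 []

-- ===== PORT B =====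
-- B's first loop: 0-based index of the first adjacent equal pair, if any
def firstPairIdx : List Char → Option Nat
  | c1 :: c2 :: t => if c1 == c2 then some 0 else (firstPairIdx (c2 :: t)).map (· + 1)
  | _ => none

-- B's final 'any(a == b for a, b in zip(s, s[1:]))'
def anyAdjPair : List Char → Bool
  | c1 :: c2 :: t => c1 == c2 || anyAdjPair (c2 :: t)
  | _ => false

def hasTwoPairs_alt (string : String) : Bool :=
  match firstPairIdx string.toList with
  | none => false
  | some f => anyAdjPair (string.toList.drop (f + 2))

-- ===== PRECONDITION & SPEC =====
def Spec_hasTwoPairs (string : String) (out : Bool) : Prop := out = hasTwoPairs_alt string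
instance (string : String) (out : Bool) : Decidable (Spec_hasTwoPairs string out) := by unfold Spec_hasTwoPairs; infer_instance

-- ===== CLAIM (what is proved, stated in full; the proofs are below) =====
def Claim_equal_hasTwoPairs : Prop := ∀ (string : String), Dom_hasTwoPairs string → Spec_hasTwoPairs string (hasTwoPairs string)

-- ===== LEMMAS AND PROOFS =====

-- A's state after the second pair of a block (pairIndex = [m, m+1]): any further pair triggers True
theorem loop_state2 (l : List Char) : ∀ (c : Char) (idx m : Int), m + 1 ≤ idx →
    hasTwoPairsLoop (c :: l) l idx [m, m + 1] = anyAdjPair (c :: l) := by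
  induction l with
  | nil => intro c idx m h; simp [hasTwoPairsLoop, anyAdjPair]
  | cons c2 t ih =>
    intro c idx m h
    by_cases hc : c = c2
    · simp only [hasTwoPairsLoop, anyAdjPair, hc, beq_self_eq_true, if_true]
      simp only [List.cons_append, List.nil_append, List.length_cons,
        PySem.List.max?_id_cons, PySem.List.min?_id_cons, List.foldl, Option.getD_some]
      rw [if_pos (by norm_num), if_pos (by omega)]
      simp
    · simp only [hasTwoPairsLoop, anyAdjPair, beq_iff_eq, if_neg hc]
      rw [ih c2 (idx + 1) m (by omega)]
      simp [hc]

-- A's state with one pair recorded and the position counter already past it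
theorem loop_state1b (l : List Char) : ∀ (c : Char) (idx m : Int), m + 1 ≤ idx →
    hasTwoPairsLoop (c :: l) l idx [m] = anyAdjPair (c :: l) := by
  induction l with
  | nil => intro c idx m h; simp [hasTwoPairsLoop, anyAdjPair]
  | cons c2 t ih =>
    intro c idx m h
    by_cases hc : c = c2
    · simp only [hasTwoPairsLoop, anyAdjPair, hc, beq_self_eq_true, if_true]
      simp only [List.cons_append, List.nil_append, List.length_cons,
        PySem.List.max?_id_cons, PySem.List.min?_id_cons, List.foldl, Option.getD_some]
      rw [if_pos (by norm_num), if_pos (by omega)]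
      simp
    · simp only [hasTwoPairsLoop, anyAdjPair, beq_iff_eq, if_neg hc]
      rw [ih c2 (idx + 1) m (by omega)]
      simp [hc]

-- A's state immediately after recording the first pair (index = m): result is any pair in the tail
theorem loop_state1 (c : Char) (l : List Char) (m : Int) :
    hasTwoPairsLoop (c :: l) l m [m] = anyAdjPair l := by
  cases l with
  | nil => simp [hasTwoPairsLoop, anyAdjPair]
  | cons c2 t =>
    by_cases hc : c = c2
    · simp only [hasTwoPairsLoop, hc, beq_self_eq_true, if_true]
      simp only [List.cons_append, List.nil_append, List.length_cons,
        PySem.List.max?_id_cons, PySem.List.min?_id_cons, List.foldl, Option.getD_some]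
      rw [if_pos (by norm_num), if_neg (by omega)]
      exact loop_state2 t c2 (m + 1) m (by omega)
    · simp only [hasTwoPairsLoop, beq_iff_eq, if_neg hc]
      cases t with
      | nil => rfl
      | cons c3 t' =>
        rw [loop_state1b (c3 :: t') c2 (m + 1) m (by omega)]

-- A's loop before any pair is found equals B's "first pair, then any later pair"
theorem loop_state0 (l : List Char) : ∀ (c : Char) (idx : Int),
    hasTwoPairsLoop (c :: l) l idx [] =
      (match firstPairIdx (c :: l) with
       | none => false
       | some f => anyAdjPair ((c :: l).drop (f + 2))) := by
  induction l with
  | nil => intro c idx; simp [hasTwoPairsLoop, firstPairIdx]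
  | cons c2 t ih =>
    intro c idx
    by_cases hc : c = c2
    · simp only [hasTwoPairsLoop, firstPairIdx, hc, beq_self_eq_true, if_true,
        List.nil_append, List.length_cons, List.length_nil]
      rw [if_neg (by norm_num)]
      exact loop_state1 c2 t (idx + 1)
    · simp only [hasTwoPairsLoop, firstPairIdx, beq_iff_eq, if_neg hc]
      rw [ih c2 (idx + 1)]
      cases hfp : firstPairIdx (c2 :: t) with
      | none => simp
      | some f => simp [List.drop]

-- ===== VERDICT (by name: the statement is the Claim_ definition above) =====
theorem hasTwoPairs_spec : Claim_equal_hasTwoPairs := by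
  intro s _
  unfold Spec_hasTwoPairs hasTwoPairs hasTwoPairs_alt
  cases h : s.toList with
  | nil => simp [hasTwoPairsLoop, firstPairIdx]
  | cons c l => simpa using loop_state0 l c 0
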